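-- pv_equiv track=rewrite | github.com/Yeshey/AdventOfCode | 2020/Day6/Day6.py | day6_p2
-- ===== SOURCE A (Python) =====
-- def day6_p2(answers: list) -> int:
--     group_answers = []
--     i = -1
--     all_yes = 0
--     for group in answers:
--         i+=1
--         group_answers.append('')
--         for person in group:
--             for ch in person:
--                 group_answers[i] += ch
--         for ch in set(group_answers[i]):
--             j=0
--             for person_answers in group:
--                 j+=1
--                 if ch not in person_answers:
--                     break
--                 if j == len(group):
--                     all_yes += 1
--     return all_yes
-- ===== SOURCE B (Python) =====
-- def day6_p2(answers: list) -> int: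
--     total = 0
--     for group in answers:
--         if not group:
--             continue
--         common = set(group[0])
--         for person in group[1:]:
--             common &= set(person)
--         total += len(common)
--     return total
-- ===== Notes on version B (the rewrite author's own statement) =====
-- stated objective: faster
-- what changed: Per group, intersect each person's character set instead of concatenating all answers and, for every distinct character, rescanning every person with an inner break loop.
import Mathlib
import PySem

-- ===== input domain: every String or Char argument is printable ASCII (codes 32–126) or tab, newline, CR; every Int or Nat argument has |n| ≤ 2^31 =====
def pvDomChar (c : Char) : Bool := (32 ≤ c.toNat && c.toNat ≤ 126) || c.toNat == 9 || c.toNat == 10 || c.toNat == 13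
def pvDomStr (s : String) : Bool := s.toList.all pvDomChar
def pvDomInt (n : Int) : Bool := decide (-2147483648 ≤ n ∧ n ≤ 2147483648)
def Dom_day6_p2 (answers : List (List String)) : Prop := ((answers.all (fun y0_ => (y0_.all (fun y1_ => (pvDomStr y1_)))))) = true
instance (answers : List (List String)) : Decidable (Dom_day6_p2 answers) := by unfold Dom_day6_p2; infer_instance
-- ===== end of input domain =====

-- B replaces A's per-distinct-char rescan of every person with one set intersection per person (asymptotically faster).

-- ===== PORT A =====
-- inner 'for person_answers in group: j+=1; if ch not in person_answers: break; if j == len(group): all_yes += 1'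
def day6InnerA (ch : Char) (n : Nat) : List String → Nat → Int → Int
  | [], _, acc => acc
  | p :: rest, j, acc =>
    if ch ∈ p.toList then
      day6InnerA ch n rest (j + 1) (if j + 1 = n then acc + 1 else acc)
    else acc

def day6_p2 (answers : List (List String)) : Int :=
  answers.foldl
    (fun all_yes group =>
      -- group_answers[i] built char by char: for person in group: for ch in person: group_answers[i] += ch
      let ga : List Char := group.foldl (fun s p => p.toList.foldl (fun s ch => s ++ [ch]) s) []
      -- for ch in set(group_answers[i]): inner loop   (order-independent: each char adds at most 1)
      (PySem.Set.ofList ga).foldl (fun acc ch => day6InnerA ch group.length group 0 acc) all_yes)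
    0

-- ===== PORT B =====
def day6_p2_alt (answers : List (List String)) : Int :=
  answers.foldl
    (fun total group =>
      match group with
      | [] => total
      | p :: rest =>
        let common : PySem.Set Char :=
          rest.foldl (fun c q => PySem.Set.inter c (PySem.Set.ofList q.toList))
            (PySem.Set.ofList p.toList)
        total + PySem.Set.len common)
    0

-- ===== PRECONDITION & SPEC =====
def Spec_day6_p2 (answers : List (List String)) (out : Int) : Prop := out = day6_p2_alt answers
instance (answers : List (List String)) (out : Int) : Decidable (Spec_day6_p2 answers out) := by unfold Spec_day6_p2; infer_instance

-- ===== CLAIM (what is proved, stated in full; the proofs are below) =====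
def Claim_equal_day6_p2 : Prop := ∀ (answers : List (List String)), Dom_day6_p2 answers → Spec_day6_p2 answers (day6_p2 answers)

-- ===== LEMMAS AND PROOFS =====

-- the per-char inner loop of A adds 1 iff every person contains ch (and the group is nonempty)
theorem day6InnerA_eq (ch : Char) (n : Nat) :
    ∀ (l : List String) (j : Nat) (acc : Int), j + l.length = n →
      day6InnerA ch n l j acc =
        acc + (if l ≠ [] ∧ ∀ p ∈ l, ch ∈ p.toList then 1 else 0) := by
  intro l
  induction l with
  | nil => intro j acc _; simp [day6InnerA]
  | cons p rest ih =>
    intro j acc h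
    by_cases hp : ch ∈ p.toList
    · cases rest with
      | nil =>
        have hj : j + 1 = n := by simpa using h
        simp [day6InnerA, hp, hj]
      | cons q rs =>
        have hj : ¬ (j + 1 = n) := by simp at h; omega
        rw [day6InnerA, if_pos hp, if_neg hj,
          ih (j + 1) acc (by simp at h ⊢; omega)]
        by_cases hall : ∀ p' ∈ q :: rs, ch ∈ p'.toList
        · simp [hp]
        · simp [hp]
    · simp [day6InnerA, hp]

-- concatenation loops of A
theorem inner_append (p : List Char) : ∀ s : List Char,
    p.foldl (fun s ch => s ++ [ch]) s = s ++ p := by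
  induction p with
  | nil => simp
  | cons c cs ih => intro s; simp [List.foldl_cons, ih]

theorem ga_eq (g : List String) : ∀ s : List Char,
    g.foldl (fun s p => p.toList.foldl (fun s ch => s ++ [ch]) s) s
      = s ++ (g.map String.toList).flatten := by
  induction g with
  | nil => simp
  | cons p rest ih => intro s; rw [List.foldl_cons, inner_append, ih]; simp

-- the fold over the distinct chars counts the chars satisfying the "everyone said yes" predicate
theorem foldl_inner_count (g : List String) :
    ∀ (s : List Char) (acc : Int),
      s.foldl (fun acc ch => day6InnerA ch g.length g 0 acc) acc
        = acc + (s.countP (fun ch => decide (g ≠ [] ∧ ∀ p ∈ g, ch ∈ p.toList)) : Int) := by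
  intro s
  induction s with
  | nil => simp
  | cons c cs ih =>
    intro acc
    rw [List.foldl_cons, ih, day6InnerA_eq c g.length g 0 acc (by omega),
      List.countP_cons]
    by_cases h : g ≠ [] ∧ ∀ p ∈ g, c ∈ p.toList
    · simp [h]; ring
    · simp [h]

-- membership in B's intersection fold
theorem mem_common (ch : Char) : ∀ (rest : List String) (c : PySem.Set Char),
    ch ∈ rest.foldl (fun c q => PySem.Set.inter c (PySem.Set.ofList q.toList)) c
      ↔ ch ∈ c ∧ ∀ q ∈ rest, ch ∈ q.toList := by
  intro rest
  induction rest with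
  | nil => simp
  | cons q rs ih =>
    intro c
    rw [List.foldl_cons, ih]
    simp [PySem.Set.mem_inter, PySem.Set.mem_ofList]
    tauto

theorem nodup_common : ∀ (rest : List String) (c : PySem.Set Char), c.Nodup →
    (rest.foldl (fun c q => PySem.Set.inter c (PySem.Set.ofList q.toList)) c).Nodup := by
  intro rest
  induction rest with
  | nil => exact fun c h => h
  | cons q rs ih => exact fun c h => ih _ (PySem.Set.nodup_inter _ _ h)

-- per-group steps of A and of B agree
theorem step_eq (group : List String) (acc : Int) :
    (let ga : List Char := group.foldl (fun s p => p.toList.foldl (fun s ch => s ++ [ch]) s) []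
     (PySem.Set.ofList ga).foldl (fun a ch => day6InnerA ch group.length group 0 a) acc)
    = (match group with
       | [] => acc
       | p :: rest =>
         acc + PySem.Set.len
           (rest.foldl (fun c q => PySem.Set.inter c (PySem.Set.ofList q.toList))
             (PySem.Set.ofList p.toList))) := by
  rw [ga_eq group [], List.nil_append, foldl_inner_count]
  cases group with
  | nil => simp
  | cons p rest =>
    have hA : (PySem.Set.ofList ((List.map String.toList (p :: rest)).flatten)).countP
        (fun ch => decide (p :: rest ≠ [] ∧ ∀ q ∈ p :: rest, ch ∈ q.toList))
        = ((PySem.Set.ofList ((List.map String.toList (p :: rest)).flatten)).filter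
            (fun ch => decide (p :: rest ≠ [] ∧ ∀ q ∈ p :: rest, ch ∈ q.toList))).length :=
      List.countP_eq_length_filter
    set L := (PySem.Set.ofList ((List.map String.toList (p :: rest)).flatten)).filter
      (fun ch => decide (p :: rest ≠ [] ∧ ∀ q ∈ p :: rest, ch ∈ q.toList)) with hL
    set C := rest.foldl (fun c q => PySem.Set.inter c (PySem.Set.ofList q.toList))
      (PySem.Set.ofList p.toList) with hC
    have hmem : ∀ ch, ch ∈ L ↔ ch ∈ C := by
      intro ch
      rw [hL, hC, List.mem_filter, mem_common]
      simp [PySem.Set.mem_ofList]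
      tauto
    have hperm : L.Perm C := by
      refine (List.perm_ext_iff_of_nodup ?_ ?_).mpr hmem
      · exact List.Nodup.filter _ (PySem.Set.nodup_ofList _)
      · exact nodup_common rest _ (PySem.Set.nodup_ofList _)
    have hlen : L.length = C.length := hperm.length_eq
    simp only [PySem.Set.len]
    rw [hA, hlen]

theorem fold_eq : ∀ (answers : List (List String)) (acc : Int),
    answers.foldl
      (fun all_yes group =>
        let ga : List Char := group.foldl (fun s p => p.toList.foldl (fun s ch => s ++ [ch]) s) []
        (PySem.Set.ofList ga).foldl (fun a ch => day6InnerA ch group.length group 0 a) all_yes) acc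
    = answers.foldl
      (fun total group =>
        match group with
        | [] => total
        | p :: rest =>
          total + PySem.Set.len
            (rest.foldl (fun c q => PySem.Set.inter c (PySem.Set.ofList q.toList))
              (PySem.Set.ofList p.toList))) acc := by
  intro answers
  induction answers with
  | nil => intro acc; rfl
  | cons g gs ih =>
    intro acc
    rw [List.foldl_cons, List.foldl_cons, step_eq, ih]

-- ===== VERDICT (by name: the statement is the Claim_ definition above) =====
theorem day6_p2_spec : Claim_equal_day6_p2 := by
  intro answers _
  unfold Spec_day6_p2 day6_p2 day6_p2_alt
  exact fold_eq answers 0
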